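-- pv_equiv track=rewrite | github.com/cindyxinyiwang/TrDec_pytorch | src/tree_utils.py | sent_piece_segs_bpe
-- ===== SOURCE A (Python) =====
-- def sent_piece_segs_bpe(p):
--   '''
-- Segment a sentence piece string into list of piece string for each word
-- '''
--   # print p
--   # print p.split()
--   # toks = re.compile(ur'\xe2\x96\x81[^(\xe2\x96\x81)]+')
--   toks = p.split()
--   ret = []
--   cur = []
--   for t in toks:
--     cur.append(t)
--     if not t.endswith(u'@@'):
--       ret.append(u' '.join(cur))
--       cur = []
--   return ret
-- ===== SOURCE B (Python) =====
-- def sent_piece_segs_bpe(p):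
--   toks = p.split()
--   bounds = [i for i, t in enumerate(toks) if not t.endswith(u'@@')]
--   ret = []
--   start = 0
--   for e in bounds:
--     ret.append(u' '.join(toks[start:e + 1]))
--     start = e + 1
--   return ret
-- ===== Notes on version B (the rewrite author's own statement) =====
-- stated objective: alternative
-- what changed: B replaces A's token-by-token accumulator (append to cur, flush at each non-'@@' token) with a two-phase decomposition: first collect the boundary indices (tokens not ending in '@@'), then emit one ' '.join of the slice between consecutive boundaries, which drops a trailing unterminated '@@' run exactly as A does.
import Mathlib
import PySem

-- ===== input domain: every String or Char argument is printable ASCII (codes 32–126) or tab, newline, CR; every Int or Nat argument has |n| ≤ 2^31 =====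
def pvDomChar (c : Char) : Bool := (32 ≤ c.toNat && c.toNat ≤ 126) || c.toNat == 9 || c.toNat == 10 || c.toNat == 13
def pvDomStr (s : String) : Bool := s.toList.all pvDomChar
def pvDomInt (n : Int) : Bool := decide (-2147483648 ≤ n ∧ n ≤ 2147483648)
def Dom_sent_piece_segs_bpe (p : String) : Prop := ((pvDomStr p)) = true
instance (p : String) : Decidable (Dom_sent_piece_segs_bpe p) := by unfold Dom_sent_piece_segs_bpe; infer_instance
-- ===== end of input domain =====

-- B replaces A's token-by-token accumulator with a boundary-index list and slicing; objective: alternative decomposition (same cost).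


-- ===== PORT A =====
def sent_piece_segs_bpe (p : String) : List String :=
  let toks := PySem.Str.split₀ p
  let res := toks.foldl
    (fun (st : List String × List String) t =>
      let cur := st.2 ++ [t]
      if ¬ PySem.Str.endswith t "@@" then (st.1 ++ [PySem.Str.join " " cur], [])
      else (st.1, cur))
    ([], [])
  res.1

-- ===== PORT B =====
def sent_piece_segs_bpe_alt (p : String) : List String :=
  let toks := PySem.Str.split₀ p
  let bounds := ((PySem.List.enumerate toks).filter
    (fun it => !PySem.Str.endswith it.2 "@@")).map Prod.fst
  let res := bounds.foldl
    (fun (st : List String × Int) e =>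
      (st.1 ++ [PySem.Str.join " " (PySem.List.slice toks (some st.2) (some (e + 1)))], e + 1))
    ([], 0)
  res.1

-- ===== PRECONDITION & SPEC =====
def Spec_sent_piece_segs_bpe (p : String) (out : List String) : Prop := out = sent_piece_segs_bpe_alt p
instance (p : String) (out : List String) : Decidable (Spec_sent_piece_segs_bpe p out) := by unfold Spec_sent_piece_segs_bpe; infer_instance

-- ===== CLAIM (what is proved, stated in full; the proofs are below) =====
def Claim_equal_sent_piece_segs_bpe : Prop := ∀ (p : String), Dom_sent_piece_segs_bpe p → Spec_sent_piece_segs_bpe p (sent_piece_segs_bpe p)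

-- ===== LEMMAS AND PROOFS =====

/-- Loop correspondence: B's fold over the boundary indices of the suffix `ts`
(slicing into the full token list `pre ++ cur ++ ts`, start pointer at `pre.length`)
equals A's fold over `ts` with accumulator `cur`. -/
lemma segs_loop (ts : List String) : ∀ (pre cur ret : List String),
    ((((PySem.List.enumerate ts ((pre.length + cur.length : Nat) : Int)).filter
        (fun it => !PySem.Str.endswith it.2 "@@")).map Prod.fst).foldl
      (fun (st : List String × Int) e =>
        (st.1 ++ [PySem.Str.join " " (PySem.List.slice (pre ++ cur ++ ts) (some st.2) (some (e + 1)))], e + 1))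
      (ret, ((pre.length : Nat) : Int))).1
    = (ts.foldl
        (fun (st : List String × List String) t =>
          let c := st.2 ++ [t]
          if ¬ PySem.Str.endswith t "@@" then (st.1 ++ [PySem.Str.join " " c], [])
          else (st.1, c))
        (ret, cur)).1 := by
  induction ts with
  | nil =>
      intro pre cur ret
      simp [PySem.List.enumerate_nil]
  | cons t ts ih =>
      intro pre cur ret
      rw [PySem.List.enumerate_cons]
      by_cases hb : PySem.Str.endswith t "@@" = true
      · -- not a boundary: t joins cur, bounds unchanged
        have h1 : pre ++ cur ++ (t :: ts) = pre ++ (cur ++ [t]) ++ ts := by simp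
        have h2 : ((pre.length + cur.length : Nat) : Int) + 1
            = ((pre.length + (cur ++ [t]).length : Nat) : Int) := by push_cast; simp; ring
        simp only [List.filter_cons, hb, Bool.not_true, Bool.false_eq_true, if_false,
          List.foldl_cons]
        rw [h1, h2, ih pre (cur ++ [t]) ret]
        simp
      · -- boundary: emit the slice, which is exactly cur ++ [t]
        rw [Bool.not_eq_true] at hb
        have hsl : PySem.List.slice (pre ++ cur ++ (t :: ts))
              (some ((pre.length : Nat) : Int))
              (some (((pre.length + cur.length : Nat) : Int) + 1))
            = cur ++ [t] := by
          have hc : (((pre.length + cur.length : Nat) : Int) + 1)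
              = ((pre.length : Nat) : Int) + ((cur.length + 1 : Nat) : Int) := by push_cast; ring
          rw [hc, PySem.List.slice_natCast_add, List.append_assoc, List.drop_left]
          rw [show cur ++ t :: ts = (cur ++ [t]) ++ ts by simp]
          rw [show cur.length + 1 = (cur ++ [t]).length by simp]
          exact List.take_left
        have h1 : pre ++ cur ++ (t :: ts) = (pre ++ cur ++ [t]) ++ [] ++ ts := by simp
        have h2 : ((pre.length + cur.length : Nat) : Int) + 1
            = (((pre ++ cur ++ [t]).length + ([] : List String).length : Nat) : Int) := by
          push_cast; simp; ring
        simp only [List.filter_cons, hb, Bool.not_false, if_true, List.map_cons,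
          List.foldl_cons]
        rw [hsl, h1, h2]
        have key := ih (pre ++ cur ++ [t]) [] (ret ++ [PySem.Str.join " " (cur ++ [t])])
        rw [show (((pre ++ cur ++ [t]).length : Nat) : Int)
              = (((pre ++ cur ++ [t]).length + ([] : List String).length : Nat) : Int) by simp] at key
        rw [key]
        simp
-- ===== VERDICT (by name: the statement is the Claim_ definition above) =====
theorem sent_piece_segs_bpe_spec : Claim_equal_sent_piece_segs_bpe := by
  intro p _
  show sent_piece_segs_bpe p = sent_piece_segs_bpe_alt p
  unfold sent_piece_segs_bpe sent_piece_segs_bpe_alt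
  have := segs_loop (PySem.Str.split₀ p) [] [] []
  simpa using this.symm
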